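-- pv_equiv track=rewrite | github.com/PrinciaFernandes/Phenomix | src/masterlist/masterlist.py | transform_detail
-- ===== SOURCE A (Python) =====
-- def transform_detail(detail_files:list)->list:
--     new_detail = []
--     for dict in detail_files:
--         detail_dict = {}
--         if 'Outcome' in dict.keys():
--             detail_dict['Name'] = dict['Outcome']
--         elif 'Disease' in dict.keys():
--             detail_dict['Name'] = dict['Disease']
--         elif "Cohort_name" in dict.keys():
--             detail_dict['Name'] = dict["Cohort_name"]
--         else:
--             detail_dict['Name'] = dict['Name']
--         if 'PID' in dict.keys():
--             detail_dict['PID'] = dict['PID']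
--         new_detail.append(detail_dict  )
--     return new_detail
-- ===== SOURCE B (Python) =====
-- _RANK = {'Outcome': 0, 'Disease': 1, 'Cohort_name': 2, 'Name': 3}
--
--
-- def _record(d):
--     # One scan over the items: keep the value of the best-ranked (smallest rank)
--     # name-like key seen so far, first occurrence winning, and the PID value.
--     best, name, pid = 4, None, None
--     for k, v in d.items():
--         r = _RANK.get(k, 4)
--         if r < best:
--             best, name = r, v
--         if pid is None and k == 'PID':
--             pid = v
--     if best == 4:
--         raise KeyError('Name')  # no name-like key present, as in the original
--     rec = {'Name': name}
--     if pid is not None: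
--         rec['PID'] = pid
--     return rec
--
--
-- def transform_detail(detail_files: list) -> list:
--     return [_record(d) for d in detail_files]
-- ===== Notes on version B (the rewrite author's own statement) =====
-- stated objective: alternative
-- what changed: A tests the four name keys for membership in a fixed if/elif priority order; B instead makes a single scan over each dict's items, maintaining the minimum-rank name candidate from a rank table (and the PID) as running state, then builds the record from that state.
import Mathlib
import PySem

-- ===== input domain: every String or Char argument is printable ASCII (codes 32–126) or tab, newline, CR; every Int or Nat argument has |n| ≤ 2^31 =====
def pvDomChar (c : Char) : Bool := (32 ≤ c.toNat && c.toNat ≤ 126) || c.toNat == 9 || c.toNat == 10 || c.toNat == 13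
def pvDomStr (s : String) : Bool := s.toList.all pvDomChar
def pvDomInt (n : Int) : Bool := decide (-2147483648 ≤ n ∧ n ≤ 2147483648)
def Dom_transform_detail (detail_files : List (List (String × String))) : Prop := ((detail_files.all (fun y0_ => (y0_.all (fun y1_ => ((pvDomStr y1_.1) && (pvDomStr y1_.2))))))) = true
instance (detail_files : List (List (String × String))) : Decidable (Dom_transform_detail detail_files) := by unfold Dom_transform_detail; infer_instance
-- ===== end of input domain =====

-- B replaces A's fixed if/elif membership chain by a single scan over each dict's items that
-- maintains the minimum-rank name candidate (rank table) and the PID as running state (alternative; same cost).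


-- ===== PORT A =====
-- Per-iteration body of A's loop. Where A raises KeyError (no name key at all) Pre_ excludes the
-- input; the getD defaults "" are never reached inside Pre_.
def pvRecA (d : PySem.Dict String String) : List (String × String) :=
  let dd : PySem.Dict String String := PySem.Dict.empty
  let dd :=
    if d.contains "Outcome" then dd.insert "Name" (d.getD "Outcome" "")
    else if d.contains "Disease" then dd.insert "Name" (d.getD "Disease" "")
    else if d.contains "Cohort_name" then dd.insert "Name" (d.getD "Cohort_name" "")
    else dd.insert "Name" (d.getD "Name" "")
  if d.contains "PID" then (dd.insert "PID" (d.getD "PID" "")).items else dd.items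

def transform_detail (detail_files : List (List (String × String))) : List (List (String × String)) :=
  detail_files.foldl (fun acc d => acc ++ [pvRecA (PySem.Dict.mk d)]) []

-- ===== PORT B =====
def pvRankTable : PySem.Dict String Int :=
  PySem.Dict.mk [("Outcome", 0), ("Disease", 1), ("Cohort_name", 2), ("Name", 3)]

def pvRank (k : String) : Int := pvRankTable.getD k 4

-- One step of Source B's inner scan; state = (best, name, pid), with None ported as Option.
def pvStep (s : Int × Option String × Option String) (kv : String × String) :
    Int × Option String × Option String :=
  let r := pvRank kv.1
  let bn := if r < s.1 then (r, some kv.2) else (s.1, s.2.1)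
  let p := if s.2.2.isNone && kv.1 == "PID" then some kv.2 else s.2.2
  (bn.1, bn.2, p)

-- _record of Source B. Where Source B raises KeyError (best == 4) it returns [] (excluded by Pre_);
-- the .getD "" extracts the name that the scan necessarily found when best ≠ 4.
def pvRecB (d : PySem.Dict String String) : List (String × String) :=
  let s := d.items.foldl pvStep (4, none, none)
  if s.1 == 4 then []
  else
    let r : PySem.Dict String String := PySem.Dict.empty.insert "Name" (s.2.1.getD "")
    match s.2.2 with
    | some pv => (r.insert "PID" pv).items
    | none => r.items

def transform_detail_alt (detail_files : List (List (String × String))) : List (List (String × String)) :=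
  detail_files.map (fun d => pvRecB (PySem.Dict.mk d))

-- ===== PRECONDITION & SPEC =====
-- Pre_ excludes exactly the inputs on which A raises KeyError: a record containing none of
-- 'Outcome', 'Disease', 'Cohort_name', 'Name'.
def Pre_transform_detail (detail_files : List (List (String × String))) : Prop :=
  ∀ d ∈ detail_files, (PySem.Dict.mk d).contains "Outcome" ∨ (PySem.Dict.mk d).contains "Disease" ∨
    (PySem.Dict.mk d).contains "Cohort_name" ∨ (PySem.Dict.mk d).contains "Name"
instance (detail_files : List (List (String × String))) : Decidable (Pre_transform_detail detail_files) := by unfold Pre_transform_detail; infer_instance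

def pvWitness_transform_detail : (List (List (String × String))) :=
  [[("Outcome", "flu"), ("PID", "1")], [("Name", "x")]]

def Spec_transform_detail (detail_files : List (List (String × String))) (out : List (List (String × String))) : Prop := out = transform_detail_alt detail_files
instance (detail_files : List (List (String × String))) (out : List (List (String × String))) : Decidable (Spec_transform_detail detail_files out) := by unfold Spec_transform_detail; infer_instance

-- ===== CLAIM (what is proved, stated in full; the proofs are below) =====
def Claim_equal_transform_detail : Prop := ∀ (detail_files : List (List (String × String))), Dom_transform_detail detail_files → Pre_transform_detail detail_files → Spec_transform_detail detail_files (transform_detail detail_files)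

-- ===== LEMMAS AND PROOFS =====
-- Proof-only helpers: first-match lookup / key-membership on the raw item list, and the two
-- independent components of Source B's scan in isolation.
theorem pvRank_eq (k : String) :
    pvRank k = if k = "Outcome" then 0 else if k = "Disease" then 1
      else if k = "Cohort_name" then 2 else if k = "Name" then 3 else 4 := by
  by_cases h1 : k = "Outcome"
  · subst h1; decide
  by_cases h2 : k = "Disease"
  · subst h2; decide
  by_cases h3 : k = "Cohort_name"
  · subst h3; decide
  by_cases h4 : k = "Name"
  · subst h4; decide
  simp [pvRank, pvRankTable, PySem.Dict.getD, PySem.Dict.get?, beq_iff_eq,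
    Ne.symm h1, Ne.symm h2, Ne.symm h3, Ne.symm h4, h1, h2, h3, h4]

def pvHasK (l : List (String × String)) (k : String) : Bool := l.any (fun p => p.1 == k)
def pvLook (l : List (String × String)) (k : String) : Option String :=
  (l.find? (fun p => p.1 == k)).map (·.2)
def pvNameFold : List (String × String) → Int → Option String → Int × Option String
  | [], b, n => (b, n)
  | (k, v) :: t, b, n =>
      if pvRank k < b then pvNameFold t (pvRank k) (some v) else pvNameFold t b n
def pvPidFold : List (String × String) → Option String → Option String
  | [], p => p
  | (k, v) :: t, p => pvPidFold t (if p.isNone && k == "PID" then some v else p)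

set_option maxHeartbeats 1000000 in
theorem pvNameFold_char (l : List (String × String)) (b : Int) (n : Option String) (hb : b ≤ 4) :
    pvNameFold l b n =
      if pvHasK l "Outcome" ∧ 0 < b then (0, pvLook l "Outcome")
      else if pvHasK l "Disease" ∧ 1 < b then (1, pvLook l "Disease")
      else if pvHasK l "Cohort_name" ∧ 2 < b then (2, pvLook l "Cohort_name")
      else if pvHasK l "Name" ∧ 3 < b then (3, pvLook l "Name")
      else (b, n) := by
  induction l generalizing b n with
  | nil => simp [pvNameFold, pvHasK]
  | cons kv t ih =>
      obtain ⟨k, v⟩ := kv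
      simp only [pvNameFold]
      by_cases h1 : k = "Outcome"
      · subst h1
        have r : pvRank "Outcome" = 0 := by decide
        rw [r]
        by_cases hlt : (0:Int) < b
        · rw [if_pos hlt, ih 0 (some v) (by omega)]
          simp [pvHasK, pvLook, hlt]
        · rw [if_neg hlt, ih b n hb]
          simp [pvHasK, pvLook, hlt]
          try split_ifs <;> simp_all
      by_cases h2 : k = "Disease"
      · subst h2
        have r : pvRank "Disease" = 1 := by decide
        rw [r]
        by_cases hlt : (1:Int) < b
        · rw [if_pos hlt, ih 1 (some v) (by omega)]
          simp [pvHasK, pvLook, hlt]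
          try split_ifs <;> (simp_all; try omega)
        · rw [if_neg hlt, ih b n hb]
          simp [pvHasK, pvLook, hlt]
          try split_ifs <;> simp_all
      by_cases h3 : k = "Cohort_name"
      · subst h3
        have r : pvRank "Cohort_name" = 2 := by decide
        rw [r]
        by_cases hlt : (2:Int) < b
        · rw [if_pos hlt, ih 2 (some v) (by omega)]
          simp [pvHasK, pvLook, hlt]
          try split_ifs <;> simp_all <;> try omega
        · rw [if_neg hlt, ih b n hb]
          simp [pvHasK, pvLook, hlt]
          try split_ifs <;> simp_all
      by_cases h4 : k = "Name"
      · subst h4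
        have r : pvRank "Name" = 3 := by decide
        rw [r]
        by_cases hlt : (3:Int) < b
        · rw [if_pos hlt, ih 3 (some v) (by omega)]
          simp [pvHasK, pvLook, hlt]
          try split_ifs <;> simp_all <;> try omega
        · rw [if_neg hlt, ih b n hb]
          simp [pvHasK, pvLook, hlt]
          try split_ifs <;> simp_all
      have r : pvRank k = 4 := by rw [pvRank_eq]; simp [h1, h2, h3, h4]
      have e1 : (k == "Outcome") = false := by simp [h1]
      have e2 : (k == "Disease") = false := by simp [h2]
      have e3 : (k == "Cohort_name") = false := by simp [h3]
      have e4 : (k == "Name") = false := by simp [h4]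
      rw [r, if_neg (by omega), ih b n hb]
      simp [pvHasK, pvLook, e1, e2, e3, e4]
      split_ifs <;> simp_all

theorem pvFold_split (l : List (String × String)) (b : Int) (n p : Option String) :
    l.foldl pvStep (b, n, p) = ((pvNameFold l b n).1, (pvNameFold l b n).2, pvPidFold l p) := by
  induction l generalizing b n p with
  | nil => rfl
  | cons kv t ih =>
      obtain ⟨k, v⟩ := kv
      simp only [List.foldl_cons, pvStep, pvNameFold, pvPidFold]
      by_cases hr : pvRank k < b <;> simp [hr, ih]

theorem pvPidFold_some (l : List (String × String)) (v : String) :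
    pvPidFold l (some v) = some v := by
  induction l with
  | nil => rfl
  | cons kv t ih => simp [pvPidFold, ih]

theorem pvPidFold_none (l : List (String × String)) :
    pvPidFold l none = pvLook l "PID" := by
  induction l with
  | nil => rfl
  | cons kv t ih =>
      obtain ⟨k, v⟩ := kv
      by_cases hk : k == "PID" <;>
        simp [pvPidFold, pvLook, hk, ih, pvPidFold_some]

theorem pvLook_isSome (l : List (String × String)) (k : String) :
    (pvLook l k).isSome = pvHasK l k := by
  induction l with
  | nil => rfl
  | cons kv t ih =>
      by_cases hk : kv.1 == k <;> simp [pvLook, pvHasK, hk] at ih ⊢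
      simpa [pvLook, pvHasK] using ih

theorem pvHasK_look (l : List (String × String)) (k : String) (h : pvHasK l k = true) :
    ∃ w, pvLook l k = some w := by
  have h2 := pvLook_isSome l k
  rw [h] at h2
  exact Option.isSome_iff_exists.mp h2

-- The two per-record computations agree whenever some name key is present.
theorem pvRec_eq (l : List (String × String))
    (h : (PySem.Dict.mk l).contains "Outcome" ∨ (PySem.Dict.mk l).contains "Disease" ∨
      (PySem.Dict.mk l).contains "Cohort_name" ∨ (PySem.Dict.mk l).contains "Name") :
    pvRecA (PySem.Dict.mk l) = pvRecB (PySem.Dict.mk l) := by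
  have hc : ∀ k, (PySem.Dict.mk l).contains k = pvHasK l k := fun _ => rfl
  have hgD : ∀ k : String, (PySem.Dict.mk l).getD k "" = (pvLook l k).getD "" := fun _ => rfl
  have hi : (PySem.Dict.mk l).items = l := rfl
  rw [hc, hc, hc, hc] at h
  unfold pvRecA pvRecB
  rw [hi, pvFold_split, pvNameFold_char l 4 none (by omega), pvPidFold_none,
    hc "Outcome", hc "Disease", hc "Cohort_name", hc "PID",
    hgD "Outcome", hgD "Disease", hgD "Cohort_name", hgD "Name"]
  by_cases h1 : pvHasK l "Outcome"
  · obtain ⟨w, hw⟩ := pvHasK_look l "Outcome" h1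
    have hP := pvLook_isSome l "PID"
    rcases hp : pvLook l "PID" with _ | pv <;> rw [hp] at hP <;>
      simp [h1, hw, hgD, hp, ← hP]
  by_cases h2 : pvHasK l "Disease"
  · obtain ⟨w, hw⟩ := pvHasK_look l "Disease" h2
    have hP := pvLook_isSome l "PID"
    rcases hp : pvLook l "PID" with _ | pv <;> rw [hp] at hP <;>
      simp [h1, h2, hw, hgD, hp, ← hP]
  by_cases h3 : pvHasK l "Cohort_name"
  · obtain ⟨w, hw⟩ := pvHasK_look l "Cohort_name" h3
    have hP := pvLook_isSome l "PID"
    rcases hp : pvLook l "PID" with _ | pv <;> rw [hp] at hP <;>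
      simp [h1, h2, h3, hw, hgD, hp, ← hP]
  have h4 : pvHasK l "Name" = true := by
    rcases h with h | h | h | h <;> simp_all
  obtain ⟨w, hw⟩ := pvHasK_look l "Name" h4
  have hP := pvLook_isSome l "PID"
  rcases hp : pvLook l "PID" with _ | pv <;> rw [hp] at hP <;>
    simp [h1, h2, h3, h4, hw, hgD, hp, ← hP]

-- ===== VERDICT (by name: the statement is the Claim_ definition above) =====
theorem transform_detail_spec : Claim_equal_transform_detail := by
  intro detail_files _ hpre
  unfold Spec_transform_detail transform_detail transform_detail_alt
  rw [PySem.List.foldl_append_singleton_eq_map]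
  exact List.map_congr_left (fun d hd => pvRec_eq d (hpre d hd))
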